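-- pv_equiv track=rewrite | github.com/juho5005/Programmers | Lv_1_OrderBy/54_과일 장수.py | solution
-- ===== SOURCE A (Python) =====
-- def solution(k, m, score):
--     l = len(score) # 사과의 총 개수
--
--     # 만들 수 있는 상자의 개수
--     c = l // m
--
--     score.sort(reverse=True) # 내림차순 정렬
--
--     idx = 0
--     res = 0
--     while c :
--         min_score = min(score[idx:idx+m])
--         res += min_score * m
--         c -= 1
--         idx += m
--     return res
-- ===== SOURCE B (Python) =====
-- def solution(k, m, score):
--     # Counting approach: no per-box scan over the sorted array at all.
--     # Tally each score, walk the distinct scores from high to low, and count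
--     # with floor-division arithmetic how many box-minimum positions fall
--     # inside each value's run of the (conceptual) descending order.
--     # (Note: unlike the original, this does not sort/mutate `score` in place.)
--     cnt = {}
--     for v in score:
--         cnt[v] = cnt.get(v, 0) + 1
--     res = 0
--     pos = 0
--     for v in sorted(cnt, reverse=True):
--         nxt = pos + cnt[v]
--         res += v * (nxt // m - pos // m)
--         pos = nxt
--     return res * m
-- ===== Notes on version B (the rewrite author's own statement) =====
-- stated objective: alternative
-- what changed: B replaces A's sort-then-scan (descending in-place sort plus an outer while-loop taking min() of every length-m slice) by a hash tally of score frequencies walked once over the distinct values in decreasing order, using floor-division on cumulative counts to determine how many box minima each value contributes; B never sorts or indexes the full list and does not mutate score.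
import Mathlib
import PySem

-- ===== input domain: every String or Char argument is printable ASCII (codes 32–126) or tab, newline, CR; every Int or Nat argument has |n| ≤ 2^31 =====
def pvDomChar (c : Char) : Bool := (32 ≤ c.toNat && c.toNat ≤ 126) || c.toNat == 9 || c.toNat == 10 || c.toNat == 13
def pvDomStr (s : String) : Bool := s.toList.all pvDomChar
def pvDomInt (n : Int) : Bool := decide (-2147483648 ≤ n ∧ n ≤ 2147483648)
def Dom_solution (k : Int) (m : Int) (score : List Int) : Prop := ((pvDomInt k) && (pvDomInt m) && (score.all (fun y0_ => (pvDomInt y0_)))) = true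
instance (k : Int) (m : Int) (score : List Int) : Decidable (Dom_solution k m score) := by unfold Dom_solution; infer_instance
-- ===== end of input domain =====

-- One honest line: B replaces the sort + per-box min() scans by a frequency
-- tally walked over the distinct values in decreasing order, counting box
-- minima with floor division on cumulative counts; return values agree, but
-- unlike A, B does NOT sort/mutate `score` in place (return-value equivalence).

-- ===== PORT A =====
-- while c: min over score[idx:idx+m]; the loop counter c is a nonnegative Int
-- under Pre_, transcribed as structural recursion on c.toNat.
-- min() of an empty slice raises ValueError in Python (unreachable under Pre_);
-- the port takes .getD 0 there.
def solLoopA (s : List Int) (m : Int) : Nat → Int → Int → Int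
  | 0, _idx, res => res
  | Nat.succ c, idx, res =>
      let min_score := (PySem.List.min? (PySem.List.slice s (some idx) (some (idx + m))) (fun y => y)).getD 0
      solLoopA s m c (idx + m) (res + min_score * m)

def solution (k : Int) (m : Int) (score : List Int) : Int :=
  let l : Int := score.length
  let c : Int := PySem.Int.floordiv l m
  let s := PySem.List.sorted score (fun y => y) true
  solLoopA s m c.toNat 0 0

-- ===== PORT B =====
-- cnt = {}; for v in score: cnt[v] = cnt.get(v, 0) + 1;
-- then one pass over sorted(cnt, reverse=True) with a (res, pos) accumulator.
def solution_alt (k : Int) (m : Int) (score : List Int) : Int :=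
  let cnt := score.foldl (fun (d : PySem.Dict Int Int) v => d.insert v (d.getD v 0 + 1)) PySem.Dict.empty
  let r := (PySem.List.sorted cnt.keys (fun y => y) true).foldl
      (fun (acc : Int × Int) v =>
        (acc.1 + v * (PySem.Int.floordiv (acc.2 + cnt.getD v 0) m - PySem.Int.floordiv acc.2 m),
         acc.2 + cnt.getD v 0))
      (0, 0)
  r.1 * m

-- ===== PRECONDITION & SPEC =====
-- A raises on every other input: ZeroDivisionError for m = 0, and for m < 0
-- with a nonempty list the loop reaches min() of an empty slice (ValueError).
-- For m < 0 with an empty list A returns 0, which Pre_ admits.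
def Pre_solution (k : Int) (m : Int) (score : List Int) : Prop :=
  1 ≤ m ∨ (m < 0 ∧ score = [])
instance (k : Int) (m : Int) (score : List Int) : Decidable (Pre_solution k m score) := by unfold Pre_solution; infer_instance

def pvWitness_solution : Int × Int × List Int := (4, 2, [1, 3, 2, 4])

def Spec_solution (k : Int) (m : Int) (score : List Int) (out : Int) : Prop := out = solution_alt k m score
instance (k : Int) (m : Int) (score : List Int) (out : Int) : Decidable (Spec_solution k m score out) := by unfold Spec_solution; infer_instance

-- ===== CLAIM (what is proved, stated in full; the proofs are below) =====
def Claim_equal_solution : Prop := ∀ (k : Int) (m : Int) (score : List Int), Dom_solution k m score → Pre_solution k m score → Spec_solution k m score (solution k m score)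

-- ===== LEMMAS AND PROOFS =====

-- the boundary element of box j in the descending-sorted list s (box size mN)
def boundD (s : List Int) (mN : Nat) (j : Nat) : Int := s.getD (j * mN + mN - 1) 0

-- sum of the boundary picks of the first c boxes, starting at offset a (A-side)
def pickSum (s : List Int) (m : Int) : Nat → Nat → Int
  | _a, 0 => 0
  | a, Nat.succ c => PySem.List.pyGetD s ((a : Int) + m - 1) 0 + pickSum s m (a + m.toNat) c

-- foldl min over a nonincreasing list keeps walking to the last element
lemma foldl_min_pairwise (l : List Int) (x : Int)
    (hp : (x :: l).Pairwise (fun a b => b ≤ a)) :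
    l.foldl min x = (x :: l).getLast (by simp) := by
  induction l generalizing x with
  | nil => simp
  | cons y t ih =>
      have hxy : y ≤ x := (List.pairwise_cons.mp hp).1 y (by simp)
      have hp' : (y :: t).Pairwise (fun a b => b ≤ a) := (List.pairwise_cons.mp hp).2
      have : min x y = y := min_eq_right hxy
      simp only [List.foldl_cons, this, ih y hp']
      exact (List.getLast_cons (by simp)).symm

-- min of a nonempty nonincreasing list is its last element
lemma min?_of_pairwise (l : List Int) (h : l ≠ [])
    (hp : l.Pairwise (fun a b => b ≤ a)) :
    PySem.List.min? l (fun y => y) = some (l.getLast h) := by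
  cases l with
  | nil => exact absurd rfl h
  | cons x t =>
      rw [PySem.List.min?_id_cons]
      exact congrArg some (foldl_min_pairwise t x hp)

-- getLast of a full-length block of s is the boundary element
lemma getLast_take_drop (s : List Int) (a mN : Nat) (h1 : 1 ≤ mN)
    (h2 : a + mN ≤ s.length) (hne : (s.drop a).take mN ≠ []) :
    ((s.drop a).take mN).getLast hne = s[a + mN - 1]'(by omega) := by
  have hlen : ((s.drop a).take mN).length = mN := by
    simp [List.length_take, List.length_drop]; omega
  rw [List.getLast_eq_getElem]
  have h3 : mN - 1 < mN := by omega
  simp only [hlen]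
  rw [List.getElem_take, List.getElem_drop]
  congr 1
  omega

lemma solLoopA_eq (m : Int) (hm : 1 ≤ m) (s : List Int)
    (hp : s.Pairwise (fun a b => b ≤ a)) :
    ∀ (c : Nat) (idx res : Int), 0 ≤ idx → idx + c * m ≤ s.length →
    solLoopA s m c idx res = res + m * pickSum s m idx.toNat c := by
  intro c
  induction c with
  | zero => intro idx res _ _; simp [solLoopA, pickSum]
  | succ c ih =>
      intro idx res h0 hle
      have hmN : (1 : Nat) ≤ m.toNat := by omega
      have hcast : ((m.toNat : Int)) = m := Int.toNat_of_nonneg (by omega)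
      have hidx : ((idx.toNat : Int)) = idx := Int.toNat_of_nonneg h0
      have hblock : idx.toNat + m.toNat ≤ s.length := by
        have hcm0 : (0 : Int) ≤ (c : Int) * m := by positivity
        have h1 : idx + m ≤ (s.length : Int) := by push_cast at hle; linarith
        omega
      have hslice : PySem.List.slice s (some idx) (some (idx + m))
          = (s.drop idx.toNat).take m.toNat := by
        rw [← hidx, ← hcast]
        exact PySem.List.slice_natCast_add s idx.toNat m.toNat
      have hne : (s.drop idx.toNat).take m.toNat ≠ [] := by
        have hl : ((s.drop idx.toNat).take m.toNat).length = m.toNat := by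
          simp [List.length_take, List.length_drop]; omega
        intro hnil; rw [hnil] at hl; simp at hl; omega
      have hpblock : ((s.drop idx.toNat).take m.toNat).Pairwise (fun a b => b ≤ a) :=
        hp.sublist ((List.take_sublist _ _).trans (List.drop_sublist _ _))
      have hmin : PySem.List.min? (PySem.List.slice s (some idx) (some (idx + m))) (fun y => y)
          = some (s[idx.toNat + m.toNat - 1]'(by omega)) := by
        rw [hslice, min?_of_pairwise _ hne hpblock,
            getLast_take_drop s idx.toNat m.toNat hmN hblock hne]
      have hget : PySem.List.pyGetD s ((idx.toNat : Int) + m - 1) 0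
          = s[idx.toNat + m.toNat - 1]'(by omega) := by
        rw [PySem.List.pyGetD_eq_getElem s 0 (by omega) (by omega)]
        congr 1
        omega
      have hrec := ih (idx + m) (res + s[idx.toNat + m.toNat - 1]'(by omega) * m)
        (by omega) (by push_cast at hle ⊢; nlinarith)
      have hidxm : (idx + m).toNat = idx.toNat + m.toNat := by omega
      simp only [solLoopA, hmin, Option.getD_some]
      rw [hrec, hidxm]
      simp only [pickSum, hget]
      ring

-- A's pickSum over full boxes is the Ico-sum of boundary elements
lemma pickSum_eq_sum (s : List Int) (mN : Nat) (hm : 1 ≤ mN) :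
    ∀ (c t : Nat), pickSum s (mN : Int) (t * mN) c
      = ∑ j ∈ Finset.Ico t (t + c), boundD s mN j := by
  intro c
  induction c with
  | zero => intro t; simp [pickSum]
  | succ c ih =>
      intro t
      have hidx : ((t * mN : Nat) : Int) + (mN : Int) - 1 = ((t * mN + mN - 1 : Nat) : Int) := by
        push_cast [Nat.cast_sub (by omega : 1 ≤ t * mN + mN)]
        ring
      have hstep : t * mN + mN = (t + 1) * mN := by ring
      rw [show pickSum s (mN : Int) (t * mN) (c + 1)
            = PySem.List.pyGetD s (((t * mN : Nat) : Int) + (mN : Int) - 1) 0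
              + pickSum s (mN : Int) (t * mN + (mN : Int).toNat) c from rfl]
      rw [hidx, PySem.List.pyGetD_natCast]
      have : t * mN + (mN : Int).toNat = (t + 1) * mN := by simp; ring
      rw [this, ih (t + 1)]
      rw [Finset.sum_Ico_eq_sum_range, Finset.sum_Ico_eq_sum_range]
      have h1 : t + (c + 1) - t = c + 1 := by omega
      have h2 : t + 1 + c - (t + 1) = c := by omega
      rw [h1, h2, Finset.sum_range_succ']
      simp only [boundD]
      have : ∀ i : Nat, t + 1 + i = t + (i + 1) := by omega
      rw [Finset.sum_congr rfl (fun i _ => by rw [this i])]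
      simp [add_comm]

-- count of a in the concatenation of runs over nodup values
lemma count_flatMap_rep (f : Int → Nat) :
    ∀ (ks : List Int), ks.Nodup → ∀ a : Int,
    (ks.flatMap (fun v => List.replicate (f v) v)).count a = if a ∈ ks then f a else 0 := by
  intro ks
  induction ks with
  | nil => intro _ a; simp
  | cons v t ih =>
      intro hnd a
      have hvt : v ∉ t := (List.nodup_cons.mp hnd).1
      have hndt : t.Nodup := (List.nodup_cons.mp hnd).2
      simp only [List.flatMap_cons, List.count_append, List.count_replicate, ih hndt a]
      by_cases hav : a = v
      · subst hav
        simp [hvt]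
      · simp [hav, Ne.symm hav]

-- the concatenation of runs over a nonincreasing value list is nonincreasing
lemma pairwise_flatMap_rep (f : Int → Nat) :
    ∀ (ks : List Int), ks.Pairwise (fun a b => b ≤ a) →
    (ks.flatMap (fun v => List.replicate (f v) v)).Pairwise (fun a b : Int => b ≤ a) := by
  intro ks
  induction ks with
  | nil => intro _; simp
  | cons v t ih =>
      intro hp
      have h1 := (List.pairwise_cons.mp hp).1
      have h2 := (List.pairwise_cons.mp hp).2
      simp only [List.flatMap_cons]
      rw [List.pairwise_append]
      refine ⟨List.pairwise_replicate.mpr (by simp), ih h2, ?_⟩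
      intro a ha b hb
      have hav : a = v := (List.eq_of_mem_replicate ha)
      obtain ⟨u, hu, hbu⟩ := List.mem_flatMap.mp hb
      have hbv : b = u := List.eq_of_mem_replicate hbu
      subst hav
      rw [hbv]
      exact h1 u hu

-- the descending-sorted list IS the concatenation of value runs, high to low
lemma runs_eq_sorted (score : List Int) :
    PySem.List.sorted score (fun y => y) true
      = (PySem.List.sorted (PySem.Set.ofList score) (fun y => y) true).flatMap
          (fun v => List.replicate (score.count v) v) := by
  have hperm0 : (PySem.List.sorted (PySem.Set.ofList score) (fun y => y) true).Perm (PySem.Set.ofList score) :=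
    PySem.List.sorted_perm ..
  have hndk : (PySem.List.sorted (PySem.Set.ofList score) (fun y => y) true).Nodup :=
    hperm0.nodup_iff.mpr (PySem.Set.nodup_ofList score)
  have hmem : ∀ a : Int, a ∈ PySem.List.sorted (PySem.Set.ofList score) (fun y => y) true ↔ a ∈ score := by
    intro a
    rw [PySem.List.mem_sorted]
    exact PySem.Set.mem_ofList score a
  have hperm : ((PySem.List.sorted (PySem.Set.ofList score) (fun y => y) true).flatMap
      (fun v => List.replicate (score.count v) v)).Perm score := by
    rw [List.perm_iff_count]
    intro a
    rw [count_flatMap_rep _ _ hndk a]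
    by_cases h : a ∈ score
    · simp [(hmem a).mpr h]
    · have h' : a ∉ PySem.List.sorted (PySem.Set.ofList score) (fun y => y) true :=
        fun hc => h ((hmem a).mp hc)
      simp [h', List.count_eq_zero_of_not_mem h]
  have hp1 : (PySem.List.sorted score (fun y => y) true).Pairwise (fun a b : Int => b ≤ a) := by
    have := PySem.List.sorted_pairwise_rev score (fun y => y) (κ := Int)
    simpa using this
  have hp2 : ((PySem.List.sorted (PySem.Set.ofList score) (fun y => y) true).flatMap
      (fun v => List.replicate (score.count v) v)).Pairwise (fun a b : Int => b ≤ a) := by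
    apply pairwise_flatMap_rep
    have := PySem.List.sorted_pairwise_rev (PySem.Set.ofList score) (fun y => y) (κ := Int)
    simpa using this
  exact List.Perm.eq_of_pairwise (le := fun a b : Int => b ≤ a)
    (fun a b _ _ h1 h2 => le_antisymm h2 h1) hp1 hp2
    ((PySem.List.sorted_perm ..).trans hperm.symm)

-- B's fold invariant: starting after a processed prefix `pre`, the fold adds
-- exactly the boundary elements of the boxes completed after `pre`.
-- every box-boundary index between the cumulative positions of a run lands in the run
lemma boundD_const (S pre rest : List Int) (v : Int) (cv mN j : Nat) (hm : 1 ≤ mN)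
    (h : S = pre ++ List.replicate cv v ++ rest)
    (hqj : pre.length / mN ≤ j) (hjq' : j < (pre.length + cv) / mN) :
    boundD S mN j = v := by
  have hdm := Nat.div_add_mod pre.length mN
  have hr : pre.length % mN < mN := Nat.mod_lt _ (by omega)
  have hA : pre.length / mN * mN ≤ j * mN := Nat.mul_le_mul_right _ hqj
  have hB : (j + 1) * mN ≤ (pre.length + cv) / mN * mN := Nat.mul_le_mul_right _ hjq'
  have hC : (pre.length + cv) / mN * mN ≤ pre.length + cv := Nat.div_mul_le_self _ _
  have hcomm : mN * (pre.length / mN) = pre.length / mN * mN := Nat.mul_comm _ _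
  have hexp : (j + 1) * mN = j * mN + mN := by ring
  have hlo : pre.length ≤ j * mN + mN - 1 := by omega
  have hhi : j * mN + mN - 1 < pre.length + cv := by omega
  unfold boundD
  generalize hgen : j * mN + mN - 1 = i at hlo hhi ⊢
  rw [h, List.getD_append _ _ _ _ (by simp; omega),
      List.getD_append_right _ _ _ _ (by omega),
      List.getD_replicate _ (by omega)]

lemma foldB_inv (score : List Int) (mN : Nat) (hm : 1 ≤ mN) :
    ∀ (ks : List Int) (pre : List Int) (res : Int),
    PySem.List.sorted score (fun y => y) true
      = pre ++ ks.flatMap (fun v => List.replicate (score.count v) v) →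
    (ks.foldl (fun (acc : Int × Int) v =>
        (acc.1 + v * (PySem.Int.floordiv (acc.2 + (score.count v : Int)) (mN : Int)
                       - PySem.Int.floordiv acc.2 (mN : Int)),
         acc.2 + (score.count v : Int))) (res, (pre.length : Int))).1
      = res + ∑ j ∈ Finset.Ico (pre.length / mN)
                ((PySem.List.sorted score (fun y => y) true).length / mN),
              boundD (PySem.List.sorted score (fun y => y) true) mN j := by
  intro ks
  induction ks with
  | nil =>
      intro pre res h
      simp only [List.flatMap_nil, List.append_nil] at h
      rw [← h]
      simp
  | cons v t ih =>
      intro pre res h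
      simp only [List.flatMap_cons] at h
      rw [← List.append_assoc] at h
      have hpl' : (pre ++ List.replicate (score.count v) v).length
          = pre.length + score.count v := by simp
      have hlenS : pre.length + score.count v
          ≤ (PySem.List.sorted score (fun y => y) true).length := by
        rw [h]; simp
      set S := PySem.List.sorted score (fun y => y) true with hS
      set cv := score.count v with hcv
      set pl := pre.length with hpl
      rw [List.foldl_cons]
      have hcast : ((pl : Int) + (cv : Int)) = (((pre ++ List.replicate cv v).length : Nat) : Int) := by
        rw [hpl']; push_cast; ring
      dsimp only
      rw [hcast]
      rw [ih (pre ++ List.replicate cv v) _ h]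
      rw [hpl']
      set q := pl / mN with hq
      set q' := (pl + cv) / mN with hq'
      set L := S.length / mN with hL
      have hqq' : q ≤ q' := Nat.div_le_div_right (Nat.le_add_right _ _)
      have hq'L : q' ≤ L := Nat.div_le_div_right hlenS
      have hconst : ∀ j ∈ Finset.Ico q q', boundD S mN j = v := by
        intro j hj
        obtain ⟨hqj, hjq'⟩ := Finset.mem_Ico.mp hj
        exact boundD_const S pre _ v cv mN j hm h hqj hjq'
      have hsplit := Finset.sum_Ico_consecutive (fun j => boundD S mN j) hqq' hq'L
      rw [← hsplit, Finset.sum_congr rfl hconst, Finset.sum_const, Nat.card_Ico, nsmul_eq_mul]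
      have hfd1 : PySem.Int.floordiv (((pl + cv : Nat) : Nat) : Int) (mN : Int) = ((q' : Nat) : Int) :=
        PySem.Int.floordiv_natCast _ _
      have hfd2 : PySem.Int.floordiv ((pl : Int)) (mN : Int) = ((q : Nat) : Int) :=
        PySem.Int.floordiv_natCast _ _
      rw [hfd1, hfd2]
      push_cast [Nat.cast_sub hqq']
      ring

-- ===== VERDICT (by name: the statement is the Claim_ definition above) =====
theorem solution_spec : Claim_equal_solution := by
  intro k m score _hdom hpre
  unfold Spec_solution
  rcases hpre with hm | ⟨hneg, hnil⟩
  · -- 1 ≤ m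
    have hmN : 1 ≤ m.toNat := by omega
    have hcast : ((m.toNat : Nat) : Int) = m := Int.toNat_of_nonneg (by omega)
    have hlenS : (PySem.List.sorted score (fun y => y) true).length = score.length :=
      PySem.List.length_sorted ..
    have hp : (PySem.List.sorted score (fun y => y) true).Pairwise (fun a b => b ≤ a) := by
      have := PySem.List.sorted_pairwise_rev score (fun y => y) (κ := Int)
      simpa using this
    -- A's value: m times the sum of the box-boundary elements
    have hA : solution k m score
        = m * ∑ j ∈ Finset.Ico 0 (score.length / m.toNat),
            boundD (PySem.List.sorted score (fun y => y) true) m.toNat j := by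
      unfold solution
      dsimp only
      have hc : PySem.Int.floordiv (score.length : Int) m
          = ((score.length / m.toNat : Nat) : Int) := by
        rw [← hcast]
        exact PySem.Int.floordiv_natCast _ _
      rw [hc]
      have hbound : (0 : Int) + ((score.length / m.toNat : Nat) : Int).toNat * m
          ≤ ((PySem.List.sorted score (fun y => y) true).length : Int) := by
        rw [hlenS, Int.toNat_natCast, ← hcast, zero_add]
        exact_mod_cast Nat.div_mul_le_self score.length m.toNat
      rw [solLoopA_eq m hm _ hp _ 0 0 le_rfl hbound]
      have hps := pickSum_eq_sum (PySem.List.sorted score (fun y => y) true) m.toNat hmN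
        (score.length / m.toNat) 0
      rw [hcast, Nat.zero_mul, Nat.zero_add] at hps
      rw [show ((0 : Int)).toNat = (0 : Nat) from rfl, Int.toNat_natCast, hps, zero_add]
    -- B's value: the same sum times m
    have hB : solution_alt k m score
        = (∑ j ∈ Finset.Ico 0 (score.length / m.toNat),
            boundD (PySem.List.sorted score (fun y => y) true) m.toNat j) * m := by
      unfold solution_alt
      dsimp only
      rw [PySem.Dict.foldl_insert_getD_add_one_eq_counter]
      simp only [PySem.Dict.keys_counter, PySem.Dict.getD_counter]
      rw [← hcast]
      have hrun : PySem.List.sorted score (fun y => y) true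
          = ([] : List Int) ++ (PySem.List.sorted (PySem.Set.ofList score) (fun y => y) true).flatMap
              (fun v => List.replicate (score.count v) v) := by
        simpa using runs_eq_sorted score
      have hinv := foldB_inv score m.toNat hmN
        (PySem.List.sorted (PySem.Set.ofList score) (fun y => y) true) [] 0 hrun
      simp only [List.length_nil, Nat.cast_zero, Nat.zero_div, hlenS, zero_add] at hinv
      rw [hinv, Int.toNat_natCast]
    rw [hA, hB]
    ring
  · -- m < 0 and score = []: both return 0
    subst hnil
    unfold solution solution_alt
    simp [solLoopA, PySem.Int.floordiv]
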